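-- pv_equiv track=rewrite | github.com/jay0423/separate_group_ga | tests.py | find_max_m_solution
-- ===== SOURCE A (Python) =====
-- def find_max_m_solution(A, p):
--     max_m = 0
--     best_solution = None
--
--     for n in range(1, A):
--         if (A - (p - 1) * n) % p == 0:
--             m = (A - (p - 1) * n) // p
--             if m > 0 and m > max_m:
--                 max_m = m
--                 best_solution = (p, m, n)
--
--     return best_solution
-- ===== SOURCE B (Python) =====
-- def find_max_m_solution(A, p):
--     # Closed form: m = (A - (p-1)n)//p is nonincreasing along valid n, so the
--     # smallest n with A + n divisible by p (n ≡ -A mod p) gives the max m.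
--     if A <= 1:
--         return None
--     r = (-A) % p
--     n = r if r >= 1 else r + abs(p)
--     if n > A - 1:
--         return None
--     m = (A - (p - 1) * n) // p
--     if m > 0:
--         return (p, m, n)
--     return None
-- ===== Notes on version B (the rewrite author's own statement) =====
-- stated objective: faster
-- what changed: Replaces the O(A) scan over n=1..A-1 by an O(1) closed form: A-(p-1)n is divisible by p iff n == -A (mod p), and m is nonincreasing along that residue class, so B computes the smallest valid n directly from (-A) % p and checks it.
import Mathlib
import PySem

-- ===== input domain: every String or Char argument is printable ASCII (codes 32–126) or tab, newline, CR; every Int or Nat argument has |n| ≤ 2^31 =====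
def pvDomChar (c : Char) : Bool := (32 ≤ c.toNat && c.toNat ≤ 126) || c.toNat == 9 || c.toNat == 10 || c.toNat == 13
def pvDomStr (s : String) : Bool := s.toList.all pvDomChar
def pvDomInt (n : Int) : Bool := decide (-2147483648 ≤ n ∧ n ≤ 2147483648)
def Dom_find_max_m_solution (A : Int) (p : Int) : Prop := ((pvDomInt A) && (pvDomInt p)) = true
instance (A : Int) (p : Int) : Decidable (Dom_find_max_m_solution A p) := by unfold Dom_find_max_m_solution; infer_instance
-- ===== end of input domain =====

-- B replaces A's O(A) scan by an O(1) congruence computation of the first valid n.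

-- ===== PORT A =====
-- loop body of A: update (max_m, best_solution) at one n
def fmmsStep (A p : Int) (st : Int × Option (List Int)) (n : Int) : Int × Option (List Int) :=
  if PySem.Int.mod (A - (p - 1) * n) p = 0 then
    let m := PySem.Int.floordiv (A - (p - 1) * n) p
    if 0 < m ∧ st.1 < m then (m, some [p, m, n]) else st
  else st

def find_max_m_solution (A : Int) (p : Int) : Option (List Int) :=
  ((PySem.List.pyRange 1 A 1).foldl (fmmsStep A p) (0, none)).2

-- ===== PORT B =====
def find_max_m_solution_alt (A : Int) (p : Int) : Option (List Int) :=
  if A ≤ 1 then none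
  else
    let r := PySem.Int.mod (-A) p
    let n := if 1 ≤ r then r else r + |p|
    if A - 1 < n then none
    else
      let m := PySem.Int.floordiv (A - (p - 1) * n) p
      if 0 < m then some [p, m, n] else none

-- ===== PRECONDITION & SPEC =====
-- Pre_ excludes exactly p = 0 with a nonempty loop (A ≥ 2), where Python's '% p' raises ZeroDivisionError in both A and B.
def Pre_find_max_m_solution (A : Int) (p : Int) : Prop := p ≠ 0 ∨ A ≤ 1
instance (A : Int) (p : Int) : Decidable (Pre_find_max_m_solution A p) := by unfold Pre_find_max_m_solution; infer_instance
def pvWitness_find_max_m_solution : Int × Int := (7, 3)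

def Spec_find_max_m_solution (A : Int) (p : Int) (out : Option (List Int)) : Prop := out = find_max_m_solution_alt A p
instance (A : Int) (p : Int) (out : Option (List Int)) : Decidable (Spec_find_max_m_solution A p out) := by unfold Spec_find_max_m_solution; infer_instance

-- ===== CLAIM (what is proved, stated in full; the proofs are below) =====
def Claim_equal_find_max_m_solution : Prop := ∀ (A : Int) (p : Int), Dom_find_max_m_solution A p → Pre_find_max_m_solution A p → Spec_find_max_m_solution A p (find_max_m_solution A p)

-- ===== LEMMAS AND PROOFS =====

-- the loop does nothing on a block of n's where its guard never fires
lemma fmms_stay (A p : Int) (st : Int × Option (List Int)) (L : List Int)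
    (h : ∀ n ∈ L, fmmsStep A p st n = st) : L.foldl (fmmsStep A p) st = st := by
  induction L with
  | nil => rfl
  | cons x L ih =>
    rw [List.foldl_cons, h x (by simp)]
    exact ih fun n hn => h n (by simp [hn])

-- A's divisibility test is the congruence n ≡ -A (mod p)
lemma fmms_cond (A p n : Int) : PySem.Int.mod (A - (p - 1) * n) p = 0 ↔ p ∣ (A + n) := by
  rw [PySem.Int.mod_eq_zero_iff_dvd]
  have e : A - (p - 1) * n = (A + n) - p * n := by ring
  rw [e]
  constructor
  · intro h
    have := dvd_add h (Dvd.intro n rfl)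
    simpa using this
  · intro h
    exact dvd_sub h (Dvd.intro n rfl)

-- floordiv is exact on multiples of p
lemma fmms_fd (x p : Int) (h : p ∣ x) : PySem.Int.floordiv x p * p = x := by
  have h1 := PySem.Int.floordiv_mul_add_mod x p
  rw [(PySem.Int.mod_eq_zero_iff_dvd x p).2 h] at h1
  omega

-- m is nonincreasing along the residue class n ≡ -A (mod p)
lemma fmms_mono (A p n₀ n : Int) (hp : p ≠ 0) (h₀ : p ∣ (A + n₀)) (h : p ∣ (A + n)) (hlt : n₀ < n) :
    PySem.Int.floordiv (A - (p - 1) * n) p ≤ PySem.Int.floordiv (A - (p - 1) * n₀) p := by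
  have d₀ : p ∣ (A - (p - 1) * n₀) := by
    have e : A - (p - 1) * n₀ = (A + n₀) - p * n₀ := by ring
    rw [e]; exact dvd_sub h₀ (Dvd.intro n₀ rfl)
  have d : p ∣ (A - (p - 1) * n) := by
    have e : A - (p - 1) * n = (A + n) - p * n := by ring
    rw [e]; exact dvd_sub h (Dvd.intro n rfl)
  have e₀ := fmms_fd _ p d₀
  have e := fmms_fd _ p d
  obtain ⟨k, hk⟩ : p ∣ (n - n₀) := by
    have := dvd_sub h h₀
    simpa using this
  set q₀ := PySem.Int.floordiv (A - (p - 1) * n₀) p with hq₀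
  set q := PySem.Int.floordiv (A - (p - 1) * n) p with hq
  have key : (q₀ - q) * p = ((p - 1) * k) * p := by linear_combination e₀ - e + (p - 1) * hk
  have hqq : q₀ - q = (p - 1) * k := mul_right_cancel₀ hp key
  have hk' : 0 ≤ (p - 1) * k := by
    rcases lt_or_gt_of_ne hp with hneg | hpos
    · have : k < 0 := by nlinarith
      nlinarith
    · have : 0 < k := by nlinarith
      nlinarith
  omega

-- B's n is ≡ -A (mod p), lies in [1, |p|], and is minimal among n ≥ 1 in the class
lemma fmms_nstar (A p r N : Int) (hp : p ≠ 0)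
    (hr : r = PySem.Int.mod (-A) p) (hN : N = if 1 ≤ r then r else r + |p|) :
    p ∣ (A + N) ∧ 1 ≤ N ∧ N ≤ |p| ∧ ∀ n, 1 ≤ n → p ∣ (A + n) → N ≤ n := by
  have hfm := PySem.Int.floordiv_mul_add_mod (-A) p
  have hdr : p ∣ (A + r) := ⟨-(PySem.Int.floordiv (-A) p), by rw [hr]; linarith⟩
  have hdN : p ∣ (A + N) := by
    by_cases h1 : 1 ≤ r
    · rw [hN, if_pos h1]; exact hdr
    · rw [hN, if_neg h1]
      have e : A + (r + |p|) = (A + r) + |p| := by ring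
      rw [e]
      exact dvd_add hdr ((dvd_abs p p).2 dvd_rfl)
  have hbound : 1 ≤ N ∧ N ≤ |p| := by
    rcases lt_or_gt_of_ne hp with hneg | hpos
    · have hb := PySem.Int.mod_neg_bounds (-A) hneg
      have habs : |p| = -p := abs_of_neg hneg
      rw [hN, if_neg (by omega : ¬ 1 ≤ r)]
      omega
    · have hb1 := PySem.Int.mod_nonneg (-A) hpos
      have hb2 := PySem.Int.mod_lt (-A) hpos
      have habs : |p| = p := abs_of_pos hpos
      by_cases h1 : 1 ≤ r
      · rw [hN, if_pos h1]; omega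
      · rw [hN, if_neg h1]; omega
  refine ⟨hdN, hbound.1, hbound.2, ?_⟩
  intro n hn hdn
  by_contra hlt
  have hd : p ∣ (N - n) := by
    have := dvd_sub hdN hdn
    simpa using this
  have : |p| ≤ N - n := Int.le_of_dvd (by omega) ((abs_dvd p (N - n)).2 hd)
  omega

-- B unfolded, with its n named
lemma fmms_alt_char (A p N : Int) (hA : 1 < A)
    (hN : N = if 1 ≤ PySem.Int.mod (-A) p then PySem.Int.mod (-A) p else PySem.Int.mod (-A) p + |p|) :
    find_max_m_solution_alt A p =
      if A - 1 < N then none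
      else if 0 < PySem.Int.floordiv (A - (p - 1) * N) p
        then some [p, PySem.Int.floordiv (A - (p - 1) * N) p, N] else none := by
  simp only [find_max_m_solution_alt, if_neg (by omega : ¬ A ≤ 1)]
  rw [← hN]

-- the empty-range case A ≤ 1
lemma fmms_range_nil (A : Int) (hA : A ≤ 1) : PySem.List.pyRange 1 A 1 = [] := by
  rw [List.eq_nil_iff_forall_not_mem]
  intro n hn
  have := (PySem.List.mem_pyRange_one).1 hn
  omega

-- ===== VERDICT (by name: the statement is the Claim_ definition above) =====
theorem find_max_m_solution_spec : Claim_equal_find_max_m_solution := by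
  intro A p _ hpre
  unfold Spec_find_max_m_solution
  by_cases hA : A ≤ 1
  · unfold find_max_m_solution find_max_m_solution_alt
    rw [fmms_range_nil A hA]
    simp [hA]
  · have hA' : 1 < A := by omega
    have hp : p ≠ 0 := by
      cases hpre with
      | inl h => exact h
      | inr h => omega
    obtain ⟨N, hN⟩ : ∃ N : Int, N = if 1 ≤ PySem.Int.mod (-A) p then PySem.Int.mod (-A) p
        else PySem.Int.mod (-A) p + |p| := ⟨_, rfl⟩
    obtain ⟨hdN, hN1, hNp, hmin⟩ := fmms_nstar A p _ N hp rfl hN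
    rw [fmms_alt_char A p N hA' hN]
    unfold find_max_m_solution
    by_cases hbig : A - 1 < N
    · rw [fmms_stay A p _ _ ?_, if_pos hbig]
      intro n hn
      have hmem := (PySem.List.mem_pyRange_one).1 hn
      have hnd : ¬ p ∣ (A + n) := fun hd => by have := hmin n (by omega) hd; omega
      simp [fmmsStep, (fmms_cond A p n), hnd]
    · rw [if_neg hbig]
      have hsplit : PySem.List.pyRange 1 A 1 =
          PySem.List.pyRange 1 N 1 ++ (N :: PySem.List.pyRange (N + 1) A 1) := by
        rw [PySem.List.pyRange_one_append 1 N A (by omega) (by omega),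
            PySem.List.pyRange_one_cons (by omega : N < A)]
      rw [hsplit, List.foldl_append]
      have hpre_stay : (PySem.List.pyRange 1 N 1).foldl (fmmsStep A p) (0, none) = (0, none) := by
        apply fmms_stay
        intro n hn
        have hmem := (PySem.List.mem_pyRange_one).1 hn
        have hnd : ¬ p ∣ (A + n) := fun hd => by have := hmin n (by omega) hd; omega
        simp [fmmsStep, (fmms_cond A p n), hnd]
      rw [hpre_stay, List.foldl_cons]
      have hstepN : fmmsStep A p (0, none) N =
          if 0 < PySem.Int.floordiv (A - (p - 1) * N) p
            then (PySem.Int.floordiv (A - (p - 1) * N) p,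
                  some [p, PySem.Int.floordiv (A - (p - 1) * N) p, N])
            else (0, none) := by
        simp only [fmmsStep]
        rw [if_pos ((fmms_cond A p N).2 hdN)]
        by_cases hm0 : 0 < PySem.Int.floordiv (A - (p - 1) * N) p <;> simp [hm0]
      rw [hstepN]
      by_cases hm0 : 0 < PySem.Int.floordiv (A - (p - 1) * N) p
      · rw [if_pos hm0, if_pos hm0]
        rw [fmms_stay A p _ _ ?_]
        intro n hn
        have hmem := (PySem.List.mem_pyRange_one).1 hn
        by_cases hd : p ∣ (A + n)
        · have hle := fmms_mono A p N n hp hdN hd (by omega)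
          simp only [fmmsStep]
          rw [if_pos ((fmms_cond A p n).2 hd), if_neg (by rintro ⟨h1, h2⟩; omega)]
        · simp [fmmsStep, (fmms_cond A p n), hd]
      · rw [if_neg hm0, if_neg hm0]
        rw [fmms_stay A p _ _ ?_]
        intro n hn
        have hmem := (PySem.List.mem_pyRange_one).1 hn
        by_cases hd : p ∣ (A + n)
        · have hle := fmms_mono A p N n hp hdN hd (by omega)
          simp only [fmmsStep]
          rw [if_pos ((fmms_cond A p n).2 hd), if_neg (by rintro ⟨h1, h2⟩; omega)]
        · simp [fmmsStep, (fmms_cond A p n), hd]
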